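-- pv_equiv track=rewrite | github.com/27pnk27/DSA-gfg | Searching.py | recur_first_occur
-- ===== SOURCE A (Python) =====
-- def recur_binsearch(x,a,high,low):
--     if(low>high):
--         return -1
--     mid=int((high+low)/2)
--     if(a[mid]==x):
--         return mid
--     elif(a[mid]>x):
--         return recur_binsearch(x,a,mid-1,low)
--     else:
--         return recur_binsearch(x,a,high,mid+1)
--
-- def recur_first_occur(x,a,high,low):
--     t=recur_binsearch(x,a,high,low)
--     if(t==-1):
--         return -1
--     else:
--         if(recur_binsearch(x,a,t-1,low)==-1):
--             return t
--         else:
--             return recur_first_occur(x,a,t-1,low)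
-- ===== SOURCE B (Python) =====
-- def recur_first_occur(x, a, high, low):
--     # Single binary search that keeps moving left on equality,
--     # instead of repeated full binary searches.
--     res = -1
--     lo, hi = low, high
--     while lo <= hi:
--         mid = (lo + hi) // 2
--         if a[mid] < x:
--             lo = mid + 1
--         elif a[mid] > x:
--             hi = mid - 1
--         else:
--             res = mid
--             hi = mid - 1
--     return res
-- ===== Notes on version B (the rewrite author's own statement) =====
-- stated objective: alternative
-- what changed: A finds any occurrence by recursive binary search and then repeatedly re-binary-searches the left part (restarting recur_first_occur) until no earlier occurrence remains; B runs a single binary search that records a hit and keeps narrowing to the left half on equality. Pre_ excludes non-empty search ranges whose searched segment a[low:high+1] is unsorted or whose bounds leave [0,len): there A raises IndexError or both values are accidents of the search path / negative-index wraparound.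
-- outside the precondition, e.g. on recur_first_occur(2, [2, 1, 2], 2, 0): A returns 0, B returns 2; on recur_first_occur(2, [-2, 0, 1, 2, 2], 1, -2): A returns -1, B returns -2; on recur_first_occur(1, [], 0, 0): A raises IndexError, B raises IndexError
import Mathlib
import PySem

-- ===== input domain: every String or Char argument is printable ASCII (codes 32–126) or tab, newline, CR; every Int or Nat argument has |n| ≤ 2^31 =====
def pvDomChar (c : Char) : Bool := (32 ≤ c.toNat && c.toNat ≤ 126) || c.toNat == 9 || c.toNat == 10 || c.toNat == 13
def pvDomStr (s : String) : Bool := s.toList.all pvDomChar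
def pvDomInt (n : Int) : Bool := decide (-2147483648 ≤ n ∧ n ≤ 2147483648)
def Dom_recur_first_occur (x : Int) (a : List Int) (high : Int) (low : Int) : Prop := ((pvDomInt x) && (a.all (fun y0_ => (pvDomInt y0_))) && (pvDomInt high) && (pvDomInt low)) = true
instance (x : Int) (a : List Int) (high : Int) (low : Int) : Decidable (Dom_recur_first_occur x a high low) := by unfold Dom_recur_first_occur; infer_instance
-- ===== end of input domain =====

-- B replaces A's repeated recursive binary searches by a single binary search that
-- records a hit and keeps narrowing to the left half on equality.
-- (Recursions are written with a Nat fuel ≥ the interval length, which the proofs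
-- below show is never exhausted; this only packages the same recursion structurally.)

-- ===== PORT A =====

-- A's recur_binsearch helper; fuel = one step per recursive call, never exhausted
def pvBsGo (x : Int) (a : List Int) : Nat → Int → Int → Int
  | 0, _, _ => -1
  | fuel + 1, high, low =>
    if low > high then -1
    else
      -- mid = int((high+low)/2): float division then truncation = truncating integer division here
      let mid := PySem.Int.truncdiv (high + low) 2
      match PySem.List.pyGet? a mid with
      | none => -1          -- Python raises IndexError here; excluded by Pre_
      | some v =>
        if v = x then mid
        else if v > x then pvBsGo x a fuel (mid - 1) low
        else pvBsGo x a fuel high (mid + 1)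

def recur_binsearch (x : Int) (a : List Int) (high : Int) (low : Int) : Int :=
  pvBsGo x a ((high - low).toNat + 1) high low

-- A's recur_first_occur, same fuel packaging (depth ≤ interval length + 1)
def pvFoGoA (x : Int) (a : List Int) : Nat → Int → Int → Int
  | 0, _, _ => -1
  | fuel + 1, high, low =>
    let t := recur_binsearch x a high low
    if t = -1 then -1
    else
      if recur_binsearch x a (t - 1) low = -1 then t
      else pvFoGoA x a fuel (t - 1) low

def recur_first_occur (x : Int) (a : List Int) (high : Int) (low : Int) : Int :=
  pvFoGoA x a ((high - low).toNat + 2) high low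

-- ===== PORT B =====

-- the 'while lo <= hi' loop of Source B, state (lo, hi, res); fuel = one step per iteration
def pvFoGoB (x : Int) (a : List Int) : Nat → Int → Int → Int → Int
  | 0, _, _, res => res
  | fuel + 1, lo, hi, res =>
    if lo > hi then res
    else
      let mid := PySem.Int.floordiv (lo + hi) 2
      match PySem.List.pyGet? a mid with
      | none => res         -- Python raises IndexError here; excluded by Pre_
      | some v =>
        if v < x then pvFoGoB x a fuel (mid + 1) hi res
        else if v > x then pvFoGoB x a fuel lo (mid - 1) res
        else pvFoGoB x a fuel lo (mid - 1) mid

def recur_first_occur_alt (x : Int) (a : List Int) (high : Int) (low : Int) : Int :=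
  pvFoGoB x a ((high - low).toNat + 1) low high (-1)

-- ===== PRECONDITION & SPEC =====
-- Pre_ excludes, on a non-empty search range (low ≤ high), inputs whose searched segment
-- a[low:high+1] is not sorted or whose bounds have low < 0 or high ≥ len(a): there A either
-- raises IndexError or its value (and B's) is an accident of the search path / Python's
-- negative-index wraparound, not a specified result.
def Pre_recur_first_occur (x : Int) (a : List Int) (high : Int) (low : Int) : Prop :=
  high < low ∨ (0 ≤ low ∧ high < (a.length : Int) ∧
    List.Pairwise (· ≤ ·) ((a.drop low.toNat).take (high + 1 - low).toNat))
instance (x : Int) (a : List Int) (high : Int) (low : Int) : Decidable (Pre_recur_first_occur x a high low) := by unfold Pre_recur_first_occur; infer_instance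

def pvWitness_recur_first_occur : Int × List Int × Int × Int := (1, [1, 1, 2], 2, 0)

def Spec_recur_first_occur (x : Int) (a : List Int) (high : Int) (low : Int) (out : Int) : Prop := out = recur_first_occur_alt x a high low
instance (x : Int) (a : List Int) (high : Int) (low : Int) (out : Int) : Decidable (Spec_recur_first_occur x a high low out) := by unfold Spec_recur_first_occur; infer_instance

-- ===== CLAIM (what is proved, stated in full; the proofs are below) =====
def Claim_equal_recur_first_occur : Prop := ∀ (x : Int) (a : List Int) (high : Int) (low : Int), Dom_recur_first_occur x a high low → Pre_recur_first_occur x a high low → Spec_recur_first_occur x a high low (recur_first_occur x a high low)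

-- ===== LEMMAS AND PROOFS =====

-- midpoint bounds for A's 'int((high+low)/2)' (truncating division)
theorem pvTdivMid (low high : Int) (h : low ≤ high) :
    low ≤ PySem.Int.truncdiv (high + low) 2 ∧ PySem.Int.truncdiv (high + low) 2 ≤ high := by
  unfold PySem.Int.truncdiv
  rw [Int.tdiv_eq_ediv]
  split_ifs <;> simp [Int.sign] <;> omega

-- a[i] as a total function (only ever used with 0 ≤ i < a.length)
def pvGetI (a : List Int) (i : Int) : Int := a.getD i.toNat 0

def pvNoOcc (x : Int) (a : List Int) (lo hi : Int) : Prop :=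
  ∀ i : Int, lo ≤ i → i ≤ hi → pvGetI a i ≠ x

def pvFirst (x : Int) (a : List Int) (lo hi r : Int) : Prop :=
  lo ≤ r ∧ r ≤ hi ∧ pvGetI a r = x ∧ ∀ i : Int, lo ≤ i → i < r → pvGetI a i ≠ x

theorem pvGetEq (a : List Int) (i : Int) (h0 : 0 ≤ i) (h1 : i < (a.length : Int)) :
    PySem.List.pyGet? a i = some (pvGetI a i) := by
  have hlt : i.toNat < a.length := by omega
  rw [PySem.List.pyGet?_eq_some_getElem a h0 (by exact_mod_cast h1)]
  unfold pvGetI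
  rw [List.getD_eq_getElem a 0 hlt]

-- sortedness of the searched window gives monotonicity of pvGetI on it
theorem pvMonoSlice (a : List Int) (low high : Int) (hl : 0 ≤ low) (hh : high < (a.length : Int))
    (hp : List.Pairwise (· ≤ ·) ((a.drop low.toNat).take (high + 1 - low).toNat)) :
    ∀ i j : Int, low ≤ i → i ≤ j → j ≤ high → pvGetI a i ≤ pvGetI a j := by
  intro i j h1 h2 h3
  rcases eq_or_lt_of_le h2 with rfl | hlt
  · exact le_refl _
  · have hi' : i.toNat < a.length := by omega
    have hj' : j.toNat < a.length := by omega
    have hlen : ((a.drop low.toNat).take (high + 1 - low).toNat).length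
        = min ((high + 1 - low).toNat) (a.length - low.toNat) := by simp
    have hii : i.toNat - low.toNat < ((a.drop low.toNat).take (high + 1 - low).toNat).length := by omega
    have hjj : j.toNat - low.toNat < ((a.drop low.toNat).take (high + 1 - low).toNat).length := by omega
    have := List.pairwise_iff_getElem.mp hp _ _ hii hjj (by omega)
    rw [List.getElem_take, List.getElem_drop] at this
    rw [List.getElem_take, List.getElem_drop] at this
    unfold pvGetI
    rw [List.getD_eq_getElem a 0 hi', List.getD_eq_getElem a 0 hj']
    convert this using 2 <;> omega

theorem pvBsGoSpec (x : Int) (a : List Int) (fuel : Nat) (high low : Int)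
    (hf : (high + 1 - low).toNat ≤ fuel)
    (hmono : ∀ i j : Int, low ≤ i → i ≤ j → j ≤ high → pvGetI a i ≤ pvGetI a j)
    (hl : 0 ≤ low) (hh : high < (a.length : Int)) :
    (pvBsGo x a fuel high low = -1 ∧ pvNoOcc x a low high) ∨
    (low ≤ pvBsGo x a fuel high low ∧ pvBsGo x a fuel high low ≤ high ∧
      pvGetI a (pvBsGo x a fuel high low) = x) := by
  fun_induction pvBsGo x a fuel high low with
  | case1 high low =>
    left
    exact ⟨rfl, fun i h1 h2 => absurd (le_trans h1 h2) (by omega)⟩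
  | case2 fuel high low hgt =>
    left
    exact ⟨rfl, fun i h1 h2 => absurd (le_trans h1 h2) (by omega)⟩
  | case3 fuel high low hgt mid heq =>
    have hm : mid = PySem.Int.truncdiv (high + low) 2 := rfl
    have hmid := pvTdivMid low high (by omega)
    rw [← hm] at hmid
    rw [pvGetEq a mid (by omega) (by omega)] at heq
    exact absurd heq (by simp)
  | case4 fuel high low hgt mid heq =>
    have hm : mid = PySem.Int.truncdiv (high + low) 2 := rfl
    have hmid := pvTdivMid low high (by omega)
    rw [← hm] at hmid
    rw [pvGetEq a mid (by omega) (by omega)] at heq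
    right
    exact ⟨hmid.1, hmid.2, (Option.some.injEq _ _ ▸ heq)⟩
  | case5 fuel high low hgt mid v heq hne hgtx ih =>
    have hm : mid = PySem.Int.truncdiv (high + low) 2 := rfl
    have hmid := pvTdivMid low high (by omega)
    rw [← hm] at hmid
    rw [pvGetEq a mid (by omega) (by omega)] at heq
    have hval : pvGetI a mid = v := (Option.some.injEq _ _ ▸ heq)
    rcases ih (by omega) (fun i j h1 h2 h3 => hmono i j h1 h2 (by omega)) hl (by omega) with ⟨h1, h2⟩ | ⟨h1, h2, h3⟩
    · left
      refine ⟨h1, fun i hi1 hi2 => ?_⟩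
      by_cases hcase : i ≤ mid - 1
      · exact h2 i hi1 hcase
      · have := hmono mid i (by omega) (by omega) (by omega)
        omega
    · right; exact ⟨h1, by omega, h3⟩
  | case6 fuel high low hgt mid v heq hne hngt ih =>
    have hm : mid = PySem.Int.truncdiv (high + low) 2 := rfl
    have hmid := pvTdivMid low high (by omega)
    rw [← hm] at hmid
    rw [pvGetEq a mid (by omega) (by omega)] at heq
    have hval : pvGetI a mid = v := (Option.some.injEq _ _ ▸ heq)
    rcases ih (by omega) (fun i j h1 h2 h3 => hmono i j (by omega) h2 h3) (by omega) hh with ⟨h1, h2⟩ | ⟨h1, h2, h3⟩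
    · left
      refine ⟨h1, fun i hi1 hi2 => ?_⟩
      by_cases hcase : mid + 1 ≤ i
      · exact h2 i hcase hi2
      · have := hmono i mid (by omega) (by omega) (by omega)
        omega
    · right; exact ⟨by omega, h2, h3⟩

theorem pvBsSpec (x : Int) (a : List Int) (high low : Int)
    (hmono : ∀ i j : Int, low ≤ i → i ≤ j → j ≤ high → pvGetI a i ≤ pvGetI a j)
    (hl : 0 ≤ low) (hh : high < (a.length : Int)) :
    (recur_binsearch x a high low = -1 ∧ pvNoOcc x a low high) ∨
    (low ≤ recur_binsearch x a high low ∧ recur_binsearch x a high low ≤ high ∧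
      pvGetI a (recur_binsearch x a high low) = x) := by
  exact pvBsGoSpec x a _ high low (by omega) hmono hl hh

theorem pvFoGoASpec (x : Int) (a : List Int) (fuel : Nat) (high low : Int)
    (hf : (high + 1 - low).toNat + 1 ≤ fuel)
    (hmono : ∀ i j : Int, low ≤ i → i ≤ j → j ≤ high → pvGetI a i ≤ pvGetI a j)
    (hl : 0 ≤ low) (hh : high < (a.length : Int)) :
    (pvFoGoA x a fuel high low = -1 ∧ pvNoOcc x a low high) ∨
    pvFirst x a low high (pvFoGoA x a fuel high low) := by
  fun_induction pvFoGoA x a fuel high low with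
  | case1 high low => omega
  | case2 fuel high low t ht =>
    have hts : t = recur_binsearch x a high low := rfl
    rcases pvBsSpec x a high low hmono hl hh with ⟨h1, h2⟩ | ⟨h1, h2, h3⟩
    · left; exact ⟨rfl, h2⟩
    · exfalso; rw [← hts] at h1; omega
  | case3 fuel high low t ht hbs2 =>
    have hts : t = recur_binsearch x a high low := rfl
    rcases pvBsSpec x a high low hmono hl hh with ⟨h1, h2⟩ | ⟨h1, h2, h3⟩
    · exact absurd (hts.trans h1) ht
    · rw [← hts] at h1 h2 h3
      right
      refine ⟨h1, h2, h3, fun i hi1 hi2 => ?_⟩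
      rcases pvBsSpec x a (t - 1) low (fun i j h1 h2 h3 => hmono i j h1 h2 (by omega)) hl (by omega) with ⟨_, h5⟩ | ⟨h4, h5, _⟩
      · exact h5 i hi1 (by omega)
      · exfalso; omega
  | case4 fuel high low t ht hbs2 ih =>
    have hts : t = recur_binsearch x a high low := rfl
    rcases pvBsSpec x a high low hmono hl hh with ⟨h1, h2⟩ | ⟨h1, h2, h3⟩
    · exact absurd (hts.trans h1) ht
    · rw [← hts] at h1 h2 h3
      rcases ih (by omega) (fun i j h1 h2 h3 => hmono i j h1 h2 (by omega)) hl (by omega) with ⟨_, h5⟩ | ⟨h4, h5, h6, h7⟩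
      · exfalso
        rcases pvBsSpec x a (t - 1) low (fun i j h1 h2 h3 => hmono i j h1 h2 (by omega)) hl (by omega) with ⟨h6, _⟩ | ⟨h6, h7, h8⟩
        · exact hbs2 h6
        · exact h5 _ h6 h7 h8
      · right; exact ⟨h4, by omega, h6, h7⟩

theorem pvFoGoBSpec (x : Int) (a : List Int) (fuel : Nat) (lo hi res : Int)
    (hf : (hi + 1 - lo).toNat ≤ fuel)
    (hmono : ∀ i j : Int, lo ≤ i → i ≤ j → j ≤ hi → pvGetI a i ≤ pvGetI a j)
    (hl : 0 ≤ lo) (hh : hi < (a.length : Int)) :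
    (pvFoGoB x a fuel lo hi res = res ∧ pvNoOcc x a lo hi) ∨
    pvFirst x a lo hi (pvFoGoB x a fuel lo hi res) := by
  fun_induction pvFoGoB x a fuel lo hi res with
  | case1 lo hi res =>
    left
    exact ⟨rfl, fun i h1 h2 => absurd (le_trans h1 h2) (by omega)⟩
  | case2 fuel lo hi res hgt =>
    left
    exact ⟨rfl, fun i h1 h2 => absurd (le_trans h1 h2) (by omega)⟩
  | case3 fuel lo hi res hgt mid heq =>
    have hm : mid = PySem.Int.floordiv (lo + hi) 2 := rfl
    have hmid := PySem.Int.floordiv_two_mid_bounds (show lo ≤ hi by omega)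
    rw [← hm] at hmid
    rw [pvGetEq a mid (by omega) (by omega)] at heq
    exact absurd heq (by simp)
  | case4 fuel lo hi res hgt mid v heq hv ih =>
    have hm : mid = PySem.Int.floordiv (lo + hi) 2 := rfl
    have hmid := PySem.Int.floordiv_two_mid_bounds (show lo ≤ hi by omega)
    rw [← hm] at hmid
    rw [pvGetEq a mid (by omega) (by omega)] at heq
    have hval : pvGetI a mid = v := (Option.some.injEq _ _ ▸ heq)
    rcases ih (by omega) (fun i j h1 h2 h3 => hmono i j (by omega) h2 h3) (by omega) hh with ⟨h1, h2⟩ | ⟨h1, h2, h3, h4⟩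
    · left
      refine ⟨h1, fun i hi1 hi2 => ?_⟩
      by_cases hcase : mid + 1 ≤ i
      · exact h2 i hcase hi2
      · have := hmono i mid (by omega) (by omega) (by omega)
        omega
    · right
      refine ⟨by omega, h2, h3, fun i hi1 hi2 => ?_⟩
      by_cases hcase : mid + 1 ≤ i
      · exact h4 i hcase hi2
      · have := hmono i mid (by omega) (by omega) (by omega)
        omega
  | case5 fuel lo hi res hgt mid v heq hnv hv ih =>
    have hm : mid = PySem.Int.floordiv (lo + hi) 2 := rfl
    have hmid := PySem.Int.floordiv_two_mid_bounds (show lo ≤ hi by omega)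
    rw [← hm] at hmid
    rw [pvGetEq a mid (by omega) (by omega)] at heq
    have hval : pvGetI a mid = v := (Option.some.injEq _ _ ▸ heq)
    rcases ih (by omega) (fun i j h1 h2 h3 => hmono i j h1 h2 (by omega)) hl (by omega) with ⟨h1, h2⟩ | ⟨h1, h2, h3, h4⟩
    · left
      refine ⟨h1, fun i hi1 hi2 => ?_⟩
      by_cases hcase : i ≤ mid - 1
      · exact h2 i hi1 hcase
      · have := hmono mid i (by omega) (by omega) (by omega)
        omega
    · right; exact ⟨h1, by omega, h3, h4⟩
  | case6 fuel lo hi res hgt mid v heq hnv hnv2 ih =>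
    have hm : mid = PySem.Int.floordiv (lo + hi) 2 := rfl
    have hmid := PySem.Int.floordiv_two_mid_bounds (show lo ≤ hi by omega)
    rw [← hm] at hmid
    rw [pvGetEq a mid (by omega) (by omega)] at heq
    have hval : pvGetI a mid = v := (Option.some.injEq _ _ ▸ heq)
    have hvx : v = x := by omega
    rcases ih (by omega) (fun i j h1 h2 h3 => hmono i j h1 h2 (by omega)) hl (by omega) with ⟨h1, h2⟩ | ⟨h1, h2, h3, h4⟩
    · right
      rw [h1]
      exact ⟨by omega, by omega, by omega, fun i hi1 hi2 => h2 i hi1 (by omega)⟩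
    · right; exact ⟨h1, by omega, h3, h4⟩

theorem pvFirstUnique (x : Int) (a : List Int) (lo hi r r' : Int)
    (h1 : pvFirst x a lo hi r) (h2 : pvFirst x a lo hi r') : r = r' := by
  obtain ⟨a1, a2, a3, a4⟩ := h1
  obtain ⟨b1, b2, b3, b4⟩ := h2
  rcases lt_trichotomy r r' with h | h | h
  · exact absurd a3 (b4 r a1 h)
  · exact h
  · exact absurd b3 (a4 r' b1 h)

theorem pvATrivial (x : Int) (a : List Int) (high low : Int) (h : high < low) :
    recur_first_occur x a high low = -1 := by
  have hbs : recur_binsearch x a high low = -1 := by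
    rw [recur_binsearch, pvBsGo]; simp [show low > high from h]
  rw [recur_first_occur, pvFoGoA]
  simp [hbs]

theorem pvBTrivial (x : Int) (a : List Int) (high low : Int) (h : high < low) :
    recur_first_occur_alt x a high low = -1 := by
  rw [recur_first_occur_alt, pvFoGoB]
  simp [show low > high from h]

-- ===== VERDICT (by name: the statement is the Claim_ definition above) =====
theorem recur_first_occur_spec : Claim_equal_recur_first_occur := by
  unfold Claim_equal_recur_first_occur
  intro x a high low _hdom hpre
  unfold Spec_recur_first_occur
  unfold Pre_recur_first_occur at hpre
  by_cases htriv : high < low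
  · rw [pvATrivial x a high low htriv, pvBTrivial x a high low htriv]
  · obtain ⟨hl, hh, hp⟩ : 0 ≤ low ∧ high < (a.length : Int) ∧
        List.Pairwise (· ≤ ·) ((a.drop low.toNat).take (high + 1 - low).toNat) := by
      rcases hpre with h | h
      · omega
      · exact h
    have hmono := pvMonoSlice a low high hl hh hp
    have hA : recur_first_occur x a high low = pvFoGoA x a ((high - low).toNat + 2) high low := rfl
    have hB : recur_first_occur_alt x a high low = pvFoGoB x a ((high - low).toNat + 1) low high (-1) := rfl
    rw [hA, hB]
    rcases pvFoGoASpec x a ((high - low).toNat + 2) high low (by omega) hmono hl hh with ⟨h1, h2⟩ | h1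
    · rcases pvFoGoBSpec x a ((high - low).toNat + 1) low high (-1) (by omega) hmono hl hh with ⟨g1, g2⟩ | g1
      · rw [h1, g1]
      · exact absurd g1.2.2.1 (h2 _ g1.1 g1.2.1)
    · rcases pvFoGoBSpec x a ((high - low).toNat + 1) low high (-1) (by omega) hmono hl hh with ⟨g1, g2⟩ | g1
      · exact absurd h1.2.2.1 (g2 _ h1.1 h1.2.1)
      · exact pvFirstUnique x a low high _ _ h1 g1
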